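-- pv_equiv track=rewrite | github.com/leezzangmin/pythonBOJ | 코딩테스트/코딜리티/2.py | solution
-- ===== SOURCE A (Python) =====
-- import copy
--
-- def binary(arr,target):
--     N=len(arr)
--     start=0
--     end=N-1
--     while start<=end:
--         mid=(start+end)//2
--         if arr[mid]==target:
--             return mid
--
--         elif arr[mid] > target:
--             end=mid-1
--         else:
--             start=mid+1
--
-- def solution(A):
--     N=len(A)
--     copy_a=sorted(copy.deepcopy(A))
--     ans=922337203685477580700
--
--     for i in range(N):
--         for j in range(i+1,N):
--             if A[i]==A[j]:
--                 return 0
--             else: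
--                 if abs(A[i]-A[j])<ans:
--                     if A[i]>A[j]:
--                         s,e=A[j],A[i]
--                     else:
--                         s,e=A[i],A[j]
--                     left=binary(copy_a,s)
--                     right=binary(copy_a,e)
--                     if left+1 != right: # 사이에 값이 있음
--                         continue
--                     else: #사이에 값 없음
--                         ans=min(ans,abs(A[i]-A[j]))
--
--     if ans==922337203685477580700:
--         return -2
--     elif ans>100000000:
--         return -1
--     return ans
-- ===== SOURCE B (Python) =====
-- def solution(A):
--     s = sorted(A)
--     if len(s) < 2:
--         return -2
--     m = min(b - a for a, b in zip(s, s[1:]))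
--     if m > 100000000:
--         return -1
--     return m
-- ===== Notes on version B (the rewrite author's own statement) =====
-- stated objective: faster
-- what changed: Replaced the O(N^2) double loop over all pairs (with a binary search per pair to test sorted-adjacency) by a single sort followed by one scan of consecutive differences, which is the same minimum.
import Mathlib
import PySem

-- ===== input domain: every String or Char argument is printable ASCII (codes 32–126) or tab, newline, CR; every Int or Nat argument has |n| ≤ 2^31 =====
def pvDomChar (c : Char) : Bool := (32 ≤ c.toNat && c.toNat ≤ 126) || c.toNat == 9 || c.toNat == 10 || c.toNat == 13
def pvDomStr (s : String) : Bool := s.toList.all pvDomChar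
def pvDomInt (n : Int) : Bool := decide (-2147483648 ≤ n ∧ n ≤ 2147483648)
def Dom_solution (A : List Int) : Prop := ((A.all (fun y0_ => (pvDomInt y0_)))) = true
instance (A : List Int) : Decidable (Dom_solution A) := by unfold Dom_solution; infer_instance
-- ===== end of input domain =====

-- B replaces A's all-pairs loop (binary-searching the sorted copy to test adjacency per pair)
-- by one sort plus a single scan of consecutive differences: same value, asymptotically faster.

-- ===== PORT A =====
-- Python's `while start<=end` binary-search loop of `binary`
def binaryGo (arr : List Int) (target start e : Int) : Option Int :=
  if h : start ≤ e then
    -- arr[mid]: in every call A makes the midpoint is in range, so the `none` arm is unreachable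
    match PySem.List.pyGet? arr (PySem.Int.floordiv (start + e) 2) with
    | none => none
    | some v =>
      if v = target then some (PySem.Int.floordiv (start + e) 2)
      else if v > target then binaryGo arr target start (PySem.Int.floordiv (start + e) 2 - 1)
      else binaryGo arr target (PySem.Int.floordiv (start + e) 2 + 1) e
  else none  -- loop fell through: Python's `binary` returns None
termination_by (e + 1 - start).toNat
decreasing_by
  · have := PySem.Int.floordiv_two_mid_bounds h; omega
  · have := PySem.Int.floordiv_two_mid_bounds h; omega

def binary (arr : List Int) (target : Int) : Option Int :=
  binaryGo arr target 0 (PySem.List.len arr - 1)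

-- inner `for j in range(i+1, N)` loop; `none` encodes the early `return 0`
def solJ (A S : List Int) (i ans : Int) (js : List Int) : Option Int :=
  match js with
  | [] => some ans
  | j :: rest =>
    -- A[i], A[j]: i and j come from range(N), always in range
    let ai := PySem.List.pyGetD A i 0
    let aj := PySem.List.pyGetD A j 0
    if ai = aj then none
    else
      let ans' :=
        if |ai - aj| < ans then
          let s := if ai > aj then aj else ai
          let e := if ai > aj then ai else aj
          -- binary always finds s and e (elements of the sorted copy): the catch-all is unreachable
          match binary S s, binary S e with
          | some left, some right => if left + 1 ≠ right then ans else min ans |ai - aj|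
          | _, _ => ans
        else ans
      solJ A S i ans' rest

-- outer `for i in range(N)` loop
def solI (A S : List Int) (ans : Int) (is_ : List Int) : Option Int :=
  match is_ with
  | [] => some ans
  | i :: rest =>
    match solJ A S i ans (PySem.List.pyRange (i + 1) (PySem.List.len A) 1) with
    | none => none
    | some ans' => solI A S ans' rest

def solution (A : List Int) : Int :=
  let S := PySem.List.sorted A (fun x => x) false   -- sorted(copy.deepcopy(A))
  match solI A S 922337203685477580700 (PySem.List.pyRange 0 (PySem.List.len A) 1) with
  | none => 0
  | some ans =>
    if ans = 922337203685477580700 then -2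
    else if ans > 100000000 then -1
    else ans

-- ===== PORT B =====
def solution_alt (A : List Int) : Int :=
  let s := PySem.List.sorted A (fun x => x) false
  if PySem.List.len s < 2 then -2
  else
    -- min over the nonempty (len s ≥ 2) generator `b - a for a, b in zip(s, s[1:])`;
    -- the `none` arm is unreachable
    match PySem.List.min? ((s.zip (PySem.List.slice s (some 1) none)).map (fun p => p.2 - p.1)) (fun d => d) with
    | some m => if m > 100000000 then -1 else m
    | none => -2

-- ===== PRECONDITION & SPEC =====
def Spec_solution (A : List Int) (out : Int) : Prop := out = solution_alt A
instance (A : List Int) (out : Int) : Decidable (Spec_solution A out) := by unfold Spec_solution; infer_instance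

-- ===== CLAIM (what is proved, stated in full; the proofs are below) =====
def Claim_equal_solution : Prop := ∀ (A : List Int), Dom_solution A → Spec_solution A (solution A)

-- ===== LEMMAS AND PROOFS =====

-- value of one inner-loop step of A, in the duplicate-free case
def fstep (S : List Int) (a : Int) (p : Int × Int) : Int :=
  if (S.idxOf (min p.1 p.2) : Int) + 1 = (S.idxOf (max p.1 p.2) : Int) then min a |p.1 - p.2| else a

-- the list of consecutive differences of S
def diffs (S : List Int) : List Int := (S.zip S.tail).map (fun p => p.2 - p.1)

lemma foldl_le_init {α : Type} (g : Int → α → Int) (hg : ∀ a x, g a x ≤ a) :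
    ∀ (l : List α) (a : Int), l.foldl g a ≤ a := by
  intro l
  induction l with
  | nil => intro a; simp
  | cons x t ih => intro a; exact le_trans (ih (g a x)) (hg a x)

lemma min_le_foldl {α : Type} (g : Int → α → Int) (m : Int) (l : List α)
    (hg : ∀ a x, x ∈ l → min a m ≤ g a x) : ∀ a, min a m ≤ l.foldl g a := by
  induction l with
  | nil => intro a; simp
  | cons x t ih =>
    intro a
    have h1 : min a m ≤ g a x := hg a x (by simp)
    have h2 : min (g a x) m ≤ t.foldl g (g a x) :=
      ih (fun b y hy => hg b y (by simp [hy])) (g a x)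
    calc min a m = min (min a m) m := by omega
      _ ≤ min (g a x) m := by omega
      _ ≤ _ := h2

lemma foldl_le_of_mem {α : Type} (g : Int → α → Int) (hg : ∀ a x, g a x ≤ a)
    (l1 l2 : List α) (x : α) (c : Int) (hx : ∀ a, g a x ≤ c) (a : Int) :
    (l1 ++ x :: l2).foldl g a ≤ c := by
  rw [List.foldl_append, List.foldl_cons]
  exact le_trans (foldl_le_init g hg l2 _) (hx _)

lemma nodup_of_strict (S : List Int) (h : S.Pairwise (· < ·)) : S.Nodup :=
  h.imp (fun hl => ne_of_lt hl)

lemma idxOf_getElem_of_nodup (S : List Int) (h : S.Nodup) (k : Nat) (hk : k < S.length) :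
    S.idxOf S[k] = k := by
  have hm : S[k] ∈ S := List.getElem_mem hk
  have h1 : S.idxOf S[k] < S.length := List.idxOf_lt_length_of_mem hm
  have h2 : S[S.idxOf S[k]] = S[k] := List.getElem_idxOf h1
  exact (List.Nodup.getElem_inj_iff h).mp h2

lemma binaryGo_finds (S : List Int) (hstrict : S.Pairwise (· < ·)) (k : Nat) (hk : k < S.length) :
    ∀ (n : Nat) (start e : Int), (e + 1 - start).toNat ≤ n → 0 ≤ start →
      e ≤ (S.length : Int) - 1 → start ≤ (k : Int) → (k : Int) ≤ e →
      binaryGo S S[k] start e = some (k : Int) := by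
  have hpair := List.pairwise_iff_getElem.mp hstrict
  intro n
  induction n with
  | zero => intro start e h1 _ _ h4 h5; omega
  | succ n ih =>
    intro start e h1 h2 h3 h4 h5
    have hse : start ≤ e := by omega
    have hmid := PySem.Int.floordiv_two_mid_bounds hse
    set mid := PySem.Int.floordiv (start + e) 2 with hmiddef
    have hmr : 0 ≤ mid ∧ mid < (S.length : Int) := by omega
    have hget : PySem.List.pyGet? S mid = some (S[mid.toNat]'(by omega)) :=
      PySem.List.pyGet?_eq_some_getElem S hmr.1 hmr.2
    rw [binaryGo, dif_pos hse, ← hmiddef, hget]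
    simp only
    by_cases heq : S[mid.toNat]'(by omega) = S[k]
    · rw [if_pos heq]
      have : mid.toNat = k := by
        by_contra hne
        rcases Nat.lt_or_ge mid.toNat k with h | h
        · exact absurd heq (ne_of_lt (hpair _ _ (by omega) hk h))
        · exact absurd heq.symm (ne_of_lt (hpair _ _ hk (by omega) (by omega)))
      exact congrArg some (by omega)
    · rw [if_neg heq]
      by_cases hgt : S[mid.toNat]'(by omega) > S[k]
      · rw [if_pos hgt]
        have hklt : k < mid.toNat := by
          by_contra h
          rcases Nat.eq_or_lt_of_le (Nat.le_of_not_lt h) with h' | h'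
          · exact heq (getElem_congr rfl h' (by omega))
          · exact absurd (hpair _ _ (by omega) hk h') (by omega)
        exact ih start (mid - 1) (by omega) h2 (by omega) h4 (by omega)
      · rw [if_neg hgt]
        have hlt : mid.toNat < k := by
          by_contra h
          rcases Nat.eq_or_lt_of_le (Nat.le_of_not_lt h) with h' | h'
          · exact heq (getElem_congr rfl h'.symm (by omega))
          · exact absurd (hpair _ _ hk (by omega) h') (by omega)
        exact ih (mid + 1) e (by omega) (by omega) h3 (by omega) h5

lemma binary_finds (S : List Int) (hstrict : S.Pairwise (· < ·)) (v : Int) (hv : v ∈ S) :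
    binary S v = some (S.idxOf v : Int) := by
  have hk : S.idxOf v < S.length := List.idxOf_lt_length_of_mem hv
  have hg : S[S.idxOf v] = v := List.getElem_idxOf hk
  have hlen1 : 1 ≤ S.length := by cases S with | nil => simp at hv | cons a t => simp
  have := binaryGo_finds S hstrict (S.idxOf v) hk S.length 0 ((S.length : Int) - 1)
    (by omega) le_rfl le_rfl (by omega) (by omega)
  rw [hg] at this
  simpa [binary, PySem.List.len_eq] using this

lemma mem_diffs (S : List Int) (d : Int) :
    d ∈ diffs S ↔ ∃ k, ∃ hk : k + 1 < S.length, d = S[k + 1] - S[k] := by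
  unfold diffs
  constructor
  · intro h
    obtain ⟨p, hp, hd⟩ := List.mem_map.mp h
    obtain ⟨i, hi, hpe⟩ := List.mem_iff_getElem.mp hp
    have hlz : (S.zip S.tail).length = min S.length S.tail.length := List.length_zip
    have htl : S.tail.length = S.length - 1 := List.length_tail
    have hi1 : i + 1 < S.length := by omega
    refine ⟨i, hi1, ?_⟩
    have hz : (S.zip S.tail)[i] = (S[i]'(by omega), S.tail[i]'(by omega)) := List.getElem_zip
    have ht : S.tail[i]'(by omega) = S[i + 1] := List.getElem_tail (by omega)
    rw [hpe] at hz
    rw [← hd, hz, ht]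
  · rintro ⟨k, hk, rfl⟩
    apply List.mem_map.mpr
    refine ⟨(S[k]'(by omega), S[k + 1]), ?_, rfl⟩
    apply List.mem_iff_getElem.mpr
    have hlz : (S.zip S.tail).length = min S.length S.tail.length := List.length_zip
    have htl : S.tail.length = S.length - 1 := List.length_tail
    refine ⟨k, by omega, ?_⟩
    have hz : (S.zip S.tail)[k]'(by omega) = (S[k]'(by omega), S.tail[k]'(by omega)) := List.getElem_zip
    have ht : S.tail[k]'(by omega) = S[k + 1] := List.getElem_tail (by omega)
    rw [hz, ht]

lemma fstep_le (S : List Int) (a : Int) (p : Int × Int) : fstep S a p ≤ a := by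
  unfold fstep; split <;> omega

lemma fstep_lower (S : List Int) (hstrict : S.Pairwise (· < ·)) (m : Int)
    (hm : ∀ d ∈ diffs S, m ≤ d) (a x y : Int) (hx : x ∈ S) (hy : y ∈ S) (hxy : x ≠ y) :
    min a m ≤ fstep S a (x, y) := by
  simp only [fstep]
  split
  · rename_i hadj
    have hu : min x y ∈ S := by rcases min_choice x y with h | h <;> rw [h] <;> assumption
    have hv : max x y ∈ S := by rcases max_choice x y with h | h <;> rw [h] <;> assumption
    have hku : S.idxOf (min x y) < S.length := List.idxOf_lt_length_of_mem hu
    have hkv : S.idxOf (max x y) < S.length := List.idxOf_lt_length_of_mem hv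
    have hgu : S[S.idxOf (min x y)] = min x y := List.getElem_idxOf hku
    have hgv : S[S.idxOf (max x y)] = max x y := List.getElem_idxOf hkv
    have hkv' : S.idxOf (max x y) = S.idxOf (min x y) + 1 := by omega
    have hmem : (max x y - min x y) ∈ diffs S := by
      rw [mem_diffs]
      refine ⟨S.idxOf (min x y), by omega, ?_⟩
      have h3 : S[S.idxOf (min x y) + 1]'(by omega) = max x y :=
        (getElem_congr rfl hkv'.symm (by omega)).trans hgv
      omega
    have hmd := hm _ hmem
    have habs : |x - y| = max x y - min x y := by
      rcases le_total x y with h | h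
      · rw [abs_of_nonpos (by omega), max_eq_right h, min_eq_left h]; ring
      · rw [abs_of_nonneg (by omega), max_eq_left h, min_eq_right h]
    rw [habs]
    omega
  · exact min_le_left a m

lemma fstep_upper (S : List Int) (hstrict : S.Pairwise (· < ·)) (k : Nat)
    (hk : k + 1 < S.length) (a x y : Int)
    (hp : (x = S[k] ∧ y = S[k + 1]) ∨ (x = S[k + 1] ∧ y = S[k])) :
    fstep S a (x, y) ≤ S[k + 1] - S[k] := by
  have hnd := nodup_of_strict S hstrict
  have hlt : S[k]'(by omega) < S[k + 1] :=
    (List.pairwise_iff_getElem.mp hstrict) k (k + 1) (by omega) hk (by omega)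
  have hu : min x y = S[k]'(by omega) := by
    rcases hp with ⟨rfl, rfl⟩ | ⟨rfl, rfl⟩
    · exact min_eq_left hlt.le
    · exact min_eq_right hlt.le
  have hv : max x y = S[k + 1] := by
    rcases hp with ⟨rfl, rfl⟩ | ⟨rfl, rfl⟩
    · exact max_eq_right hlt.le
    · exact max_eq_left hlt.le
  have habs : |x - y| = S[k + 1] - S[k]'(by omega) := by
    rcases hp with ⟨rfl, rfl⟩ | ⟨rfl, rfl⟩
    · rw [abs_sub_comm]; exact abs_of_nonneg (by omega)
    · exact abs_of_nonneg (by omega)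
  simp only [fstep]
  rw [hu, hv, idxOf_getElem_of_nodup S hnd k (by omega), idxOf_getElem_of_nodup S hnd (k + 1) hk]
  rw [if_pos (by push_cast; ring)]
  rw [habs]
  exact min_le_right _ _

lemma solJ_eq (A S : List Int) (hstrict : S.Pairwise (· < ·))
    (hmem : ∀ x ∈ A, x ∈ S) (i : Int) (hi : 0 ≤ i ∧ i < (A.length : Int)) :
    ∀ (js : List Int) (ans : Int), (∀ j ∈ js, 0 ≤ j ∧ j < (A.length : Int)) →
      (∀ j ∈ js, PySem.List.pyGetD A i 0 ≠ PySem.List.pyGetD A j 0) →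
      solJ A S i ans js =
        some (js.foldl (fun a j => fstep S a (PySem.List.pyGetD A i 0, PySem.List.pyGetD A j 0)) ans) := by
  intro js
  induction js with
  | nil => intro ans _ _; simp [solJ]
  | cons j rest ih =>
    intro ans hjr hne
    have hj := hjr j (by simp)
    have hneq := hne j (by simp)
    have hai : PySem.List.pyGetD A i 0 ∈ A :=
      PySem.List.pyGetD_mem A 0 (by constructor <;> omega)
    have haj : PySem.List.pyGetD A j 0 ∈ A :=
      PySem.List.pyGetD_mem A 0 (by constructor <;> omega)
    set ai := PySem.List.pyGetD A i 0 with hai_def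
    set aj := PySem.List.pyGetD A j 0 with haj_def
    have hstep : (if |ai - aj| < ans then
          match binary S (if ai > aj then aj else ai), binary S (if ai > aj then ai else aj) with
          | some left, some right => if left + 1 ≠ right then ans else min ans |ai - aj|
          | _, _ => ans
        else ans) = fstep S ans (ai, aj) := by
      by_cases hlt : |ai - aj| < ans
      · rw [if_pos hlt]
        have hsmin : (if ai > aj then aj else ai) = min ai aj := by split <;> omega
        have hsmax : (if ai > aj then ai else aj) = max ai aj := by split <;> omega
        rw [hsmin, hsmax,
          binary_finds S hstrict _ (by rcases min_choice ai aj with h | h <;> rw [h] <;> exact hmem _ (by assumption)),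
          binary_finds S hstrict _ (by rcases max_choice ai aj with h | h <;> rw [h] <;> exact hmem _ (by assumption))]
        simp only [fstep, ne_eq, ite_not]
      · rw [if_neg hlt]
        simp only [fstep]
        split
        · omega
        · rfl
    rw [solJ, if_neg hneq, hstep]
    rw [List.foldl_cons]
    exact ih (fstep S ans (ai, aj)) (fun j' hj' => hjr j' (by simp [hj'])) (fun j' hj' => hne j' (by simp [hj']))

lemma solI_eq (A S : List Int) (hstrict : S.Pairwise (· < ·))
    (hmem : ∀ x ∈ A, x ∈ S) (hnd : A.Nodup) :
    ∀ (is_ : List Int) (ans : Int), (∀ i ∈ is_, 0 ≤ i ∧ i < (A.length : Int)) →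
      solI A S ans is_ =
        some (is_.foldl (fun a i =>
          (PySem.List.pyRange (i + 1) (A.length : Int) 1).foldl
            (fun a' j => fstep S a' (PySem.List.pyGetD A i 0, PySem.List.pyGetD A j 0)) a) ans) := by
  intro is_
  induction is_ with
  | nil => intro ans _; simp [solI]
  | cons i rest ih =>
    intro ans hir
    have hi := hir i (by simp)
    have hne : ∀ j ∈ PySem.List.pyRange (i + 1) (A.length : Int) 1,
        PySem.List.pyGetD A i 0 ≠ PySem.List.pyGetD A j 0 := by
      intro j hj
      rw [PySem.List.mem_pyRange_one] at hj
      rw [PySem.List.pyGetD_eq_getElem A 0 (by omega) (by omega),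
          PySem.List.pyGetD_eq_getElem A 0 (by omega) (by omega)]
      intro hcontra
      have := (List.Nodup.getElem_inj_iff hnd).mp hcontra
      omega
    have hJ := solJ_eq A S hstrict hmem i hi (PySem.List.pyRange (i + 1) (A.length : Int) 1) ans
      (by intro j hj; rw [PySem.List.mem_pyRange_one] at hj; omega) hne
    rw [solI]
    simp only [PySem.List.len_eq]
    rw [hJ]
    rw [List.foldl_cons]
    exact ih _ (fun i' hi' => hir i' (by simp [hi']))

lemma solJ_none (A S : List Int) (i : Int) (j : Int) :
    ∀ (js : List Int) (ans : Int), j ∈ js →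
      PySem.List.pyGetD A i 0 = PySem.List.pyGetD A j 0 → solJ A S i ans js = none := by
  intro js
  induction js with
  | nil => intro ans h; simp at h
  | cons j' rest ih =>
    intro ans hj heq
    by_cases h : PySem.List.pyGetD A i 0 = PySem.List.pyGetD A j' 0
    · rw [solJ, if_pos h]
    · rw [solJ, if_neg h]
      have hjr : j ∈ rest := by
        rcases List.mem_cons.mp hj with rfl | hr
        · exact absurd heq h
        · exact hr
      exact ih _ hjr heq

lemma solI_none (A S : List Int) (i j : Int) (hj : j ∈ PySem.List.pyRange (i + 1) (PySem.List.len A) 1)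
    (heq : PySem.List.pyGetD A i 0 = PySem.List.pyGetD A j 0) :
    ∀ (is_ : List Int) (ans : Int), i ∈ is_ → solI A S ans is_ = none := by
  intro is_
  induction is_ with
  | nil => intro ans h; simp at h
  | cons i' rest ih =>
    intro ans hi
    by_cases h : i' = i
    · subst h
      rw [solI, solJ_none A S i' j _ ans hj heq]
    · have hir : i ∈ rest := by
        rcases List.mem_cons.mp hi with rfl | hr
        · exact absurd rfl h
        · exact hr
      rw [solI]
      cases hJ : solJ A S i' ans (PySem.List.pyRange (i' + 1) (PySem.List.len A) 1) with
      | none => rfl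
      | some a => exact ih a hir

lemma exists_adjacent_dup (S : List Int) (hsort : S.Pairwise (· ≤ ·)) (hnd : ¬ S.Nodup) :
    ∃ k, ∃ hk : k + 1 < S.length, S[k] = S[k + 1] := by
  induction S with
  | nil => exact absurd List.nodup_nil hnd
  | cons x xs ih =>
    rw [List.pairwise_cons] at hsort
    by_cases hmem : x ∈ xs
    · cases xs with
      | nil => simp at hmem
      | cons y t =>
        have hxy : x ≤ y := hsort.1 y (by simp)
        have hyx : y ≤ x := by
          rcases List.mem_cons.mp hmem with rfl | hr
          · exact le_rfl
          · exact (List.pairwise_cons.mp hsort.2).1 x hr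
        exact ⟨0, by simp, by simp; omega⟩
    · have hnd' : ¬ xs.Nodup := by
        intro h
        exact hnd (List.nodup_cons.mpr ⟨hmem, h⟩)
      obtain ⟨k, hk, he⟩ := ih hsort.2 hnd'
      exact ⟨k + 1, by simpa using hk, by simpa using he⟩

lemma strict_of_nodup (S : List Int) (hsort : S.Pairwise (· ≤ ·)) (hnd : S.Nodup) :
    S.Pairwise (· < ·) := by
  rw [List.pairwise_iff_getElem] at *
  intro i j hi hj hij
  exact lt_of_le_of_ne (hsort i j hi hj hij)
    (by rw [List.Nodup] at hnd; exact (List.pairwise_iff_getElem.mp hnd) i j hi hj hij)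


lemma solI_main (A S : List Int) (hstrict : S.Pairwise (· < ·)) (hperm : S.Perm A)
    (hnd : A.Nodup) (hN : 2 ≤ A.length) (m : Int)
    (hmq : PySem.List.min? (diffs S) (fun d => d) = some m) (hms : m ≤ 922337203685477580700) :
    solI A S 922337203685477580700 (PySem.List.pyRange 0 (PySem.List.len A) 1) = some m := by
  have hmemS : ∀ x ∈ A, x ∈ S := fun x hx => hperm.mem_iff.mpr hx
  have hlen : S.length = A.length := hperm.length_eq
  have hmlow : ∀ d ∈ diffs S, m ≤ d := fun d hd => PySem.List.min?_isMin hmq d hd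
  obtain ⟨k0, hk0, hmeq⟩ := (mem_diffs S m).mp (PySem.List.min?_mem hmq)
  have hu : S[k0]'(by omega) ∈ A := hperm.mem_iff.mp (List.getElem_mem (by omega))
  have hv : S[k0 + 1] ∈ A := hperm.mem_iff.mp (List.getElem_mem hk0)
  obtain ⟨iu, hiu, hiueq⟩ := List.mem_iff_getElem.mp hu
  obtain ⟨iv, hiv, hiveq⟩ := List.mem_iff_getElem.mp hv
  have huv : S[k0]'(by omega) < S[k0 + 1] :=
    (List.pairwise_iff_getElem.mp hstrict) _ _ (by omega) hk0 (by omega)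
  have hneuv : iu ≠ iv := by
    intro h
    subst h
    rw [hiveq] at hiueq
    omega
  obtain ⟨i0, j0, hij, hj0, hvals⟩ :
      ∃ i0 j0 : Nat, ∃ (h1 : i0 < j0) (h2 : j0 < A.length),
        ((A[i0]'(by omega) = S[k0]'(by omega) ∧ A[j0]'(by omega) = S[k0 + 1]) ∨
         (A[i0]'(by omega) = S[k0 + 1] ∧ A[j0]'(by omega) = S[k0]'(by omega))) := by
    rcases Nat.lt_or_ge iu iv with h | h
    · exact ⟨iu, iv, h, hiv, Or.inl ⟨hiueq, hiveq⟩⟩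
    · exact ⟨iv, iu, by omega, hiu, Or.inr ⟨hiveq, hiueq⟩⟩
  rw [solI_eq A S hstrict hmemS hnd _ 922337203685477580700
    (by intro i hi; simp only [PySem.List.len_eq] at hi; rw [PySem.List.mem_pyRange_one] at hi; omega)]
  apply congrArg
  simp only [PySem.List.len_eq]
  apply le_antisymm
  · -- upper bound: the fold reaches the pair realising the minimum consecutive difference
    have hsplit : PySem.List.pyRange 0 ((A.length : Int)) 1 =
        PySem.List.pyRange 0 (i0 : Int) 1 ++ ((i0 : Int) :: PySem.List.pyRange ((i0 : Int) + 1) (A.length : Int) 1) := by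
      rw [PySem.List.pyRange_one_append 0 (i0 : Int) (A.length : Int) (by omega) (by omega)]
      rw [PySem.List.pyRange_one_cons (a := (i0 : Int)) (b := (A.length : Int)) (by omega)]
    rw [hsplit]
    apply foldl_le_of_mem _ (fun a x => foldl_le_init _ (fun a' y => fstep_le S a' _) _ a)
    intro a
    have hsplit2 : PySem.List.pyRange ((i0 : Int) + 1) ((A.length : Int)) 1 =
        PySem.List.pyRange ((i0 : Int) + 1) (j0 : Int) 1 ++ ((j0 : Int) :: PySem.List.pyRange ((j0 : Int) + 1) (A.length : Int) 1) := by
      rw [PySem.List.pyRange_one_append ((i0 : Int) + 1) (j0 : Int) (A.length : Int) (by omega) (by omega)]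
      rw [PySem.List.pyRange_one_cons (a := (j0 : Int)) (b := (A.length : Int)) (by omega)]
    rw [hsplit2]
    apply foldl_le_of_mem _ (fun a x => fstep_le S a _)
    intro a'
    rw [hmeq]
    rw [PySem.List.pyGetD_eq_getElem A 0 (by omega) (by omega),
        PySem.List.pyGetD_eq_getElem A 0 (by omega) (by omega)]
    apply fstep_upper S hstrict k0 hk0
    simpa using hvals
  · -- lower bound: every accepted pair difference is a consecutive difference, hence ≥ m
    have hminm : min 922337203685477580700 m = m := min_eq_right hms
    rw [← hminm]
    apply min_le_foldl
    intro a i hi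
    rw [PySem.List.mem_pyRange_one] at hi
    apply min_le_foldl
    intro a' j hj
    rw [PySem.List.mem_pyRange_one] at hj
    have hine : PySem.List.pyGetD A i 0 ≠ PySem.List.pyGetD A j 0 := by
      rw [PySem.List.pyGetD_eq_getElem A 0 (by omega) (by omega),
          PySem.List.pyGetD_eq_getElem A 0 (by omega) (by omega)]
      intro hcontra
      have := (List.Nodup.getElem_inj_iff hnd).mp hcontra
      omega
    exact fstep_lower S hstrict m hmlow a' _ _
      (hmemS _ (PySem.List.pyGetD_mem A 0 (by constructor <;> omega)))
      (hmemS _ (PySem.List.pyGetD_mem A 0 (by constructor <;> omega))) hine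

lemma length_diffs (S : List Int) : (diffs S).length = S.length - 1 := by
  simp [diffs]

lemma alt_eq (A : List Int) :
    solution_alt A =
      (if (((PySem.List.sorted A (fun x => x) false).length : Int)) < 2 then -2
       else match PySem.List.min? (diffs (PySem.List.sorted A (fun x => x) false)) (fun d => d) with
         | some m => if m > 100000000 then -1 else m
         | none => -2) := by
  simp only [solution_alt, PySem.List.len_eq, PySem.List.slice_from_one, diffs]

lemma solution_small (A : List Int) (h : A.length ≤ 1) : solution A = -2 := by
  rcases Nat.le_one_iff_eq_zero_or_eq_one.mp h with h0 | h1
  · simp only [solution, PySem.List.len_eq, h0]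
    norm_num [PySem.List.pyRange_one_eq_nil, solI]
  · simp only [solution, PySem.List.len_eq, h1]
    rw [show PySem.List.pyRange 0 ((1 : Nat) : Int) 1 = [0] from by decide]
    rw [show solI A (PySem.List.sorted A (fun x => x) false) 922337203685477580700 [0] =
        some 922337203685477580700 from ?_]
    · norm_num
    · rw [solI, show PySem.List.pyRange (0 + 1) (PySem.List.len A) 1 = [] from by
        rw [PySem.List.len_eq, h1]; exact PySem.List.pyRange_one_eq_nil (by norm_num)]
      rw [solJ]
      rfl

-- ===== VERDICT (by name: the statement is the Claim_ definition above) =====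
theorem solution_spec : Claim_equal_solution := by
  intro A hdom
  unfold Spec_solution
  have hdom' : ∀ x ∈ A, -2147483648 ≤ x ∧ x ≤ 2147483648 := by
    intro x hx
    have := (List.all_eq_true.mp hdom) x hx
    simpa [pvDomInt] using this
  set S := PySem.List.sorted A (fun x => x) false with hSdef
  have hperm : S.Perm A := PySem.List.sorted_perm A (fun x => x) false
  have hlen : S.length = A.length := hperm.length_eq
  have hsort : S.Pairwise (· ≤ ·) := PySem.List.sorted_pairwise A (fun x => x)
  by_cases hnd : A.Nodup
  · by_cases hsmall : A.length ≤ 1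
    · rw [solution_small A hsmall, alt_eq]
      rw [if_pos (by rw [hlen]; exact_mod_cast by omega)]
    · -- N ≥ 2, distinct values
      have hN : 2 ≤ A.length := by omega
      have hstrict : S.Pairwise (· < ·) := strict_of_nodup S hsort (hperm.nodup_iff.mpr hnd)
      have hdne : diffs S ≠ [] := by
        have := length_diffs S
        intro h
        rw [h] at this
        simp at this
        omega
      cases hmq : PySem.List.min? (diffs S) (fun d => d) with
      | none => exact absurd ((PySem.List.min?_eq_none_iff _ _).mp hmq) hdne
      | some m =>
        obtain ⟨k0, hk0, hmeq⟩ := (mem_diffs S m).mp (PySem.List.min?_mem hmq)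
        have hbu := hdom' _ (hperm.mem_iff.mp (List.getElem_mem (show k0 < S.length by omega)))
        have hbv := hdom' _ (hperm.mem_iff.mp (List.getElem_mem hk0))
        have hms : m ≤ 4294967296 := by omega
        rw [alt_eq, ← hSdef]
        simp only [solution]
        rw [← hSdef]
        rw [solI_main A S hstrict hperm hnd hN m hmq (le_trans hms (by norm_num))]
        rw [if_neg (show ¬ ((S.length : Int) < 2) by omega)]
        simp only
        rw [if_neg (show m ≠ 922337203685477580700 by omega), hmq]
  · -- duplicate values: A returns 0 early, B's minimum consecutive difference is 0
    have hex : ∃ (i j : Nat) (hi : i < A.length) (hj : j < A.length), i < j ∧ A[i] = A[j] := by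
      by_contra h
      push Not at h
      exact hnd (List.pairwise_iff_getElem.mpr (fun i j hi hj hij => h i j hi hj hij))
    obtain ⟨i, j, hi, hj, hij, heqv⟩ := hex
    have hjr : (j : Int) ∈ PySem.List.pyRange ((i : Int) + 1) (PySem.List.len A) 1 := by
      simp only [PySem.List.len_eq, PySem.List.mem_pyRange_one]
      omega
    have heq' : PySem.List.pyGetD A (i : Int) 0 = PySem.List.pyGetD A (j : Int) 0 := by
      rw [PySem.List.pyGetD_eq_getElem A 0 (by omega) (by omega),
          PySem.List.pyGetD_eq_getElem A 0 (by omega) (by omega)]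
      simp only [Int.toNat_natCast]
      exact heqv
    have hnone := solI_none A S (i : Int) (j : Int) hjr heq'
      (PySem.List.pyRange 0 (PySem.List.len A) 1) 922337203685477580700
      (by simp only [PySem.List.len_eq, PySem.List.mem_pyRange_one]; omega)
    simp only [solution]
    rw [← hSdef, hnone]
    rw [alt_eq, ← hSdef]
    have hndS : ¬ S.Nodup := fun h => hnd (hperm.nodup_iff.mp h)
    obtain ⟨k, hk, he⟩ := exists_adjacent_dup S hsort hndS
    have h0 : (0 : Int) ∈ diffs S := (mem_diffs S 0).mpr ⟨k, hk, by omega⟩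
    cases hmq : PySem.List.min? (diffs S) (fun d => d) with
    | none =>
      rw [(PySem.List.min?_eq_none_iff _ _).mp hmq] at h0
      simp at h0
    | some m =>
      have hm0 : m ≤ 0 := PySem.List.min?_isMin hmq 0 h0
      obtain ⟨k', hk', hmeq⟩ := (mem_diffs S m).mp (PySem.List.min?_mem hmq)
      have hle : S[k']'(by omega) ≤ S[k' + 1] :=
        (List.pairwise_iff_getElem.mp hsort) _ _ (by omega) hk' (by omega)
      have hmz : m = 0 := by omega
      rw [if_neg (show ¬ ((S.length : Int) < 2) by omega)]
      simp only
      rw [hmz]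
      norm_num
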